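-- pv_equiv track=rewrite | github.com/pkang6689-pixel/pkang6689-pixel.github.io | scripts/rename_archive.py | extract_prefix_and_type
-- ===== SOURCE A (Python) =====
-- TYPES = ["_Video", "_Summary", "_Practice", "_Quiz"]
--
-- def extract_prefix_and_type(filename):
--     """Extract the topic prefix and file type from an archive filename."""
--     base = filename.replace(".html", "")
--
--     # Handle _DUP suffix
--     is_dup = "_DUP" in base
--     base = base.replace("_DUP", "")
--
--     # Try to match against known types
--     for t in TYPES:
--         if base.endswith(t):
--             prefix = base[:-len(t)]
--             return prefix, t, is_dup
--
--     return None, None, False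
-- ===== SOURCE B (Python) =====
-- TYPES = ["_Video", "_Summary", "_Practice", "_Quiz"]
-- TYPE_SET = set(TYPES)
--
-- def extract_prefix_and_type(filename):
--     """Extract the topic prefix and file type from an archive filename."""
--     base = filename.replace(".html", "")
--     is_dup = "_DUP" in base
--     base = base.replace("_DUP", "")
--     head, sep, tail = base.rpartition("_")
--     candidate = "_" + tail
--     if sep and candidate in TYPE_SET:
--         return head, candidate, is_dup
--     return None, None, False
-- ===== Notes on version B (the rewrite author's own statement) =====
-- stated objective: idiomatic
-- what changed: Replaces the ordered endswith-scan over the four TYPES with a single rpartition at the last underscore plus one set-membership test of the resulting candidate suffix.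
import Mathlib
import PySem

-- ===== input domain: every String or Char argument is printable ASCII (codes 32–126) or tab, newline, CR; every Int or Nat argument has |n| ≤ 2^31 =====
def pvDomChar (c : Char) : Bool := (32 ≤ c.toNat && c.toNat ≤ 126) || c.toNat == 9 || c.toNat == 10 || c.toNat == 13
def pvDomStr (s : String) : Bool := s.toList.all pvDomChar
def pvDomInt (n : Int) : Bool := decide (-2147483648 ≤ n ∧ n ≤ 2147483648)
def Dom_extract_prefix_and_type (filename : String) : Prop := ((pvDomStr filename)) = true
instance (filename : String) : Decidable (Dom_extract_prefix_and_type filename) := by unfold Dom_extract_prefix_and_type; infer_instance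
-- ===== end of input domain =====

-- B replaces the ordered endswith-scan over TYPES by one rpartition at the last underscore
-- plus a set-membership test of the candidate suffix (idiomatic; same return value).

-- ===== PORT A =====
def pvTYPES : List String := ["_Video", "_Summary", "_Practice", "_Quiz"]

-- 'for t in TYPES: if base.endswith(t): return base[:-len(t)], t, is_dup'
def pvLoopA (base : String) (is_dup : Bool) : List String → Option String × Option String × Bool
  | [] => (none, none, false)
  | t :: ts =>
    if PySem.Str.endswith base t then
      (some (PySem.Str.slice base none (some (-(t.toList.length : Int)))), some t, is_dup)
    else pvLoopA base is_dup ts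

def extract_prefix_and_type (filename : String) : Option String × Option String × Bool :=
  let base := PySem.Str.replace filename ".html" ""
  let is_dup := PySem.Str.isIn "_DUP" base
  let base := PySem.Str.replace base "_DUP" ""
  pvLoopA base is_dup pvTYPES

-- ===== PORT B =====
def pvTypeSet : PySem.Set String := PySem.Set.ofList pvTYPES

-- hand port of base.rpartition('_') (exact: split at the LAST '_', empty sep part when absent)
-- followed by the set-membership test of '_' + tail.
def pvCoreB (base : String) (is_dup : Bool) : Option String × Option String × Bool :=
  let rev := base.toList.reverse
  let tail := (rev.takeWhile (fun c => c != '_')).reverse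
  match rev.dropWhile (fun c => c != '_') with
  | [] => (none, none, false)          -- sep = '' : no underscore in base
  | _ :: rrest =>
    let candidate := String.ofList ('_' :: tail)
    if PySem.Set.contains pvTypeSet candidate then
      (some (String.ofList rrest.reverse), some candidate, is_dup)
    else (none, none, false)

def extract_prefix_and_type_alt (filename : String) : Option String × Option String × Bool :=
  let base := PySem.Str.replace filename ".html" ""
  let is_dup := PySem.Str.isIn "_DUP" base
  let base := PySem.Str.replace base "_DUP" ""
  pvCoreB base is_dup

-- ===== PRECONDITION & SPEC =====
def Spec_extract_prefix_and_type (filename : String) (out : Option String × Option String × Bool) : Prop := out = extract_prefix_and_type_alt filename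
instance (filename : String) (out : Option String × Option String × Bool) : Decidable (Spec_extract_prefix_and_type filename out) := by unfold Spec_extract_prefix_and_type; infer_instance

-- ===== CLAIM (what is proved, stated in full; the proofs are below) =====
def Claim_equal_extract_prefix_and_type : Prop := ∀ (filename : String), Dom_extract_prefix_and_type filename → Spec_extract_prefix_and_type filename (extract_prefix_and_type filename)

-- ===== LEMMAS AND PROOFS =====

-- a suffix ending in '_'-free tchr, read on the reversed list: (tchr ++ ['_']) is a prefix of rev
-- iff takeWhile (≠ '_') is exactly tchr and an '_' follows.
lemma pvP (tchr : List Char) (h : '_' ∉ tchr) :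
    ∀ rev : List Char,
      ((tchr ++ ['_']) <+: rev ↔
        rev.takeWhile (fun c => c != '_') = tchr ∧ rev.dropWhile (fun c => c != '_') ≠ []) := by
  induction tchr with
  | nil =>
    intro rev
    cases rev with
    | nil => simp
    | cons c r =>
      by_cases hc : c = '_'
      · subst hc; simp
      · simp [hc, List.cons_prefix_cons, Ne.symm hc]
  | cons a as ih =>
    intro rev
    have ha : a ≠ '_' := fun e => h (e ▸ List.mem_cons_self)
    have has : '_' ∉ as := fun e => h (List.mem_cons_of_mem _ e)
    cases rev with
    | nil => simp
    | cons c r =>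
      by_cases hc : c = '_'
      · subst hc
        simp only [List.cons_append, List.cons_prefix_cons, List.takeWhile_cons,
          List.dropWhile_cons]
        simp
        exact fun e => (ha e).elim
      · have h1 : List.takeWhile (fun c => c != '_') (c :: r)
            = c :: List.takeWhile (fun c => c != '_') r := by
          simp [hc]
        have h2 : List.dropWhile (fun c => c != '_') (c :: r)
            = List.dropWhile (fun c => c != '_') r := by
          simp [hc]
        rw [List.cons_append, List.cons_prefix_cons, h1, h2]
        constructor
        · rintro ⟨rfl, hp⟩
          rcases (ih has r).1 hp with ⟨hx, hy⟩
          exact ⟨by rw [hx], hy⟩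
        · rintro ⟨he, hy⟩
          rw [List.cons_eq_cons] at he
          exact ⟨he.1.symm, (ih has r).2 ⟨he.2, hy⟩⟩

lemma pvEnds (base t : String) (tchr : List Char) (h : '_' ∉ tchr)
    (ht : t.toList = ('_' :: tchr.reverse)) :
    (PySem.Str.endswith base t = true ↔
      base.toList.reverse.takeWhile (fun c => c != '_') = tchr ∧
      base.toList.reverse.dropWhile (fun c => c != '_') ≠ []) := by
  rw [show PySem.Str.endswith base t = PySem.Chars.endswith base.toList t.toList from rfl,
    PySem.Chars.endswith_iff, ht]
  rw [← List.reverse_prefix]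
  simpa using pvP tchr h base.toList.reverse


-- the head of a nonempty dropWhile fails the predicate
lemma pvDropHead {p : Char → Bool} {l : List Char} {c : Char} {r : List Char}
    (h : l.dropWhile p = c :: r) : p c = false := by
  have hne : l.dropWhile p ≠ [] := by simp [h]
  have h2 := List.head_dropWhile_not p hne
  simp only [h, List.head_cons] at h2
  simpa using h2

-- when the last '_'-segment matches t's tail, A's endswith fires and A's slice is B's head part
lemma pvStep (base t : String) (tchr : List Char) (c : Char) (rrest : List Char)
    (h : '_' ∉ tchr) (ht : t.toList = '_' :: tchr.reverse)
    (hk : base.toList.reverse.takeWhile (fun c => c != '_') = tchr)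
    (hdw : base.toList.reverse.dropWhile (fun c => c != '_') = c :: rrest) :
    PySem.Str.endswith base t = true ∧
    PySem.Str.slice base none (some (-(t.toList.length : Int))) = String.ofList rrest.reverse := by
  refine ⟨(pvEnds base t tchr h ht).2 ⟨hk, by simp [hdw]⟩, ?_⟩
  have hbase : base.toList = (rrest.reverse ++ [c]) ++ tchr.reverse := by
    have := List.takeWhile_append_dropWhile (p := fun c => c != '_') (l := base.toList.reverse)
    rw [hk, hdw] at this
    calc base.toList = base.toList.reverse.reverse := by simp
    _ = (tchr ++ c :: rrest).reverse := by rw [this]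
    _ = (rrest.reverse ++ [c]) ++ tchr.reverse := by simp
  rw [← String.toList_inj, PySem.Str.toList_slice, String.toList_ofList,
    PySem.Chars.slice_eq_listSlice]
  have hlen : 0 < t.toList.length := by rw [ht]; simp
  rw [PySem.List.slice_to_neg_natCast base.toList t.toList.length hlen]
  have hlt : t.toList.length = tchr.length + 1 := by rw [ht]; simp
  have hbl : base.toList.length - t.toList.length = rrest.length := by
    rw [hbase, hlt]; simp
  rw [hbl, hbase, List.append_assoc, List.take_left' (by simp)]

-- turns 'candidate string = type literal' back into an equation on the takeWhile segment
lemma pvCandInv {k : List Char} {t : String} {tchr : List Char}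
    (ht : t.toList = '_' :: tchr.reverse)
    (h : String.ofList ('_' :: k.reverse) = t) : k = tchr := by
  apply_fun String.toList at h
  rw [String.toList_ofList, ht, List.cons_eq_cons] at h
  exact List.reverse_inj.mp h.2

-- the core equivalence, independent of how base/is_dup were obtained
lemma pvCore_eq (base : String) (d : Bool) : pvLoopA base d pvTYPES = pvCoreB base d := by
  have nend : ∀ (t : String) (tchr : List Char), '_' ∉ tchr → t.toList = '_' :: tchr.reverse →
      ¬ (base.toList.reverse.takeWhile (fun c => c != '_') = tchr ∧
         base.toList.reverse.dropWhile (fun c => c != '_') ≠ []) →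
      PySem.Str.endswith base t = false := by
    intro t tchr h ht hne
    rw [← Bool.not_eq_true, pvEnds base t tchr h ht]
    exact hne
  cases hdw : base.toList.reverse.dropWhile (fun c => c != '_') with
  | nil =>
    have e1 := nend "_Video" ['o','e','d','i','V'] (by decide) (by decide) (by simp [hdw])
    have e2 := nend "_Summary" ['y','r','a','m','m','u','S'] (by decide) (by decide) (by simp [hdw])
    have e3 := nend "_Practice" ['e','c','i','t','c','a','r','P'] (by decide) (by decide) (by simp [hdw])
    have e4 := nend "_Quiz" ['z','i','u','Q'] (by decide) (by decide) (by simp [hdw])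
    simp only [pvLoopA, pvTYPES, pvCoreB, hdw, e1, e2, e3, e4, Bool.false_eq_true, if_false]
  | cons c rrest =>
    have hc : c = '_' := by
      have := pvDropHead hdw
      simpa using this
    subst hc
    by_cases hV : base.toList.reverse.takeWhile (fun c => c != '_') = ['o','e','d','i','V']
    · obtain ⟨hend, hsl⟩ := pvStep base "_Video" _ _ rrest (by decide) (by decide) hV hdw
      simp only [pvLoopA, pvTYPES, pvCoreB, hdw, hV, hend, if_true, hsl]
      norm_num [pvTypeSet, pvTYPES]
    by_cases hS : base.toList.reverse.takeWhile (fun c => c != '_') = ['y','r','a','m','m','u','S']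
    · obtain ⟨hend, hsl⟩ := pvStep base "_Summary" _ _ rrest (by decide) (by decide) hS hdw
      have e1 := nend "_Video" ['o','e','d','i','V'] (by decide) (by decide) (fun hx => hV hx.1)
      simp only [pvLoopA, pvTYPES, pvCoreB, hdw, hS, hend, e1, Bool.false_eq_true, if_false,
        if_true, hsl]
      norm_num [pvTypeSet, pvTYPES]
    by_cases hP : base.toList.reverse.takeWhile (fun c => c != '_') = ['e','c','i','t','c','a','r','P']
    · obtain ⟨hend, hsl⟩ := pvStep base "_Practice" _ _ rrest (by decide) (by decide) hP hdw
      have e1 := nend "_Video" ['o','e','d','i','V'] (by decide) (by decide) (fun hx => hV hx.1)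
      have e2 := nend "_Summary" ['y','r','a','m','m','u','S'] (by decide) (by decide) (fun hx => hS hx.1)
      simp only [pvLoopA, pvTYPES, pvCoreB, hdw, hP, hend, e1, e2, Bool.false_eq_true, if_false,
        if_true, hsl]
      norm_num [pvTypeSet, pvTYPES]
    by_cases hQ : base.toList.reverse.takeWhile (fun c => c != '_') = ['z','i','u','Q']
    · obtain ⟨hend, hsl⟩ := pvStep base "_Quiz" _ _ rrest (by decide) (by decide) hQ hdw
      have e1 := nend "_Video" ['o','e','d','i','V'] (by decide) (by decide) (fun hx => hV hx.1)
      have e2 := nend "_Summary" ['y','r','a','m','m','u','S'] (by decide) (by decide) (fun hx => hS hx.1)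
      have e3 := nend "_Practice" ['e','c','i','t','c','a','r','P'] (by decide) (by decide) (fun hx => hP hx.1)
      simp only [pvLoopA, pvTYPES, pvCoreB, hdw, hQ, hend, e1, e2, e3, Bool.false_eq_true,
        if_false, if_true, hsl]
      norm_num [pvTypeSet, pvTYPES]
    · have e1 := nend "_Video" ['o','e','d','i','V'] (by decide) (by decide) (fun hx => hV hx.1)
      have e2 := nend "_Summary" ['y','r','a','m','m','u','S'] (by decide) (by decide) (fun hx => hS hx.1)
      have e3 := nend "_Practice" ['e','c','i','t','c','a','r','P'] (by decide) (by decide) (fun hx => hP hx.1)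
      have e4 := nend "_Quiz" ['z','i','u','Q'] (by decide) (by decide) (fun hx => hQ hx.1)
      have hcont : PySem.Set.contains pvTypeSet
          (String.ofList ('_' :: (base.toList.reverse.takeWhile (fun c => c != '_')).reverse)) = false := by
        rw [← Bool.not_eq_true, PySem.Set.contains_iff]
        intro hmem
        simp only [pvTypeSet, PySem.Set.mem_ofList, pvTYPES, List.mem_cons,
          List.not_mem_nil, or_false] at hmem
        rcases hmem with h | h | h | h
        · exact hV (pvCandInv (by decide) h)
        · exact hS (pvCandInv (by decide) h)
        · exact hP (pvCandInv (by decide) h)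
        · exact hQ (pvCandInv (by decide) h)
      simp only [pvLoopA, pvTYPES, pvCoreB, hdw, e1, e2, e3, e4, Bool.false_eq_true,
        if_false, hcont]


-- ===== VERDICT (by name: the statement is the Claim_ definition above) =====
theorem extract_prefix_and_type_spec : Claim_equal_extract_prefix_and_type := by
  intro filename _
  unfold Spec_extract_prefix_and_type extract_prefix_and_type extract_prefix_and_type_alt
  exact pvCore_eq _ _
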